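-- pv_equiv track=rewrite | github.com/hannahtrautmann/Python-Assignment | python_assignment.py | possible_kmers_list
-- ===== SOURCE A (Python) =====
-- def possible_kmers_list(sequence):
--     """
--     Summary line: Generates a list of possible kmers for a given sequence
--
--     Extended description:Takes a sequence and determines if 4^k is smaller than the length of the sequence -k + 1 for any given k.
--     Whichever value is smaller for each k, that is the possible kmers. Adds this value to a list.
--
--     Parameters:
--     sequence : a string of nucleotides
--
--     Return:
--     list : a list that contains number of possible kmers for each possible k
--     """
--     possible = []
--     for i in range(1,len(sequence)+1):
--         if (len(sequence) - i + 1) > (4**i):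
--             possible.append(4**i)
--         else:
--             possible.append(len(sequence) - i + 1)
--     return possible
-- ===== SOURCE B (Python) =====
-- def possible_kmers_list(sequence):
--     """Same values as A: for k = 1..len, min(4**k, len-k+1).
--     Faster: grow the power incrementally until it crosses len-k+1,
--     then the remainder is the countdown len-k+1, ..., 1 in one go."""
--     n = len(sequence)
--     possible = []
--     p = 4
--     i = 1
--     while i <= n and p < n - i + 1:
--         possible.append(p)
--         p *= 4
--         i += 1
--     possible.extend(range(n - i + 1, 0, -1))
--     return possible
-- ===== Notes on version B (the rewrite author's own statement) =====
-- stated objective: faster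
-- what changed: Instead of recomputing the bignum power 4**i from scratch at every k, B grows the power incrementally only until it crosses len-k+1 and then emits the remaining values as the countdown range(len-i+1, 0, -1) in one extend.
import Mathlib
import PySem

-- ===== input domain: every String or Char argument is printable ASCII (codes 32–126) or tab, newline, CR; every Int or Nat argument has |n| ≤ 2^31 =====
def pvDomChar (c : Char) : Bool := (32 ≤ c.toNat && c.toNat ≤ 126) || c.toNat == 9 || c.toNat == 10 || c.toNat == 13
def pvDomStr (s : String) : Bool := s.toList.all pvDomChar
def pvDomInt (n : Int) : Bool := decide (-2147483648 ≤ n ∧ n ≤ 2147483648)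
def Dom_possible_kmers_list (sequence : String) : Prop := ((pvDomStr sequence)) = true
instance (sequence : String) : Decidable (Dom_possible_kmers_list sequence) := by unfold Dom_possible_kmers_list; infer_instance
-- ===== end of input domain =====

-- B replaces A's per-k recomputation of 4**k by an incrementally grown power until it
-- crosses len-k+1, then fills the rest with a single countdown range (objective: faster).


-- ===== PORT A =====
-- 4**i with i ∈ range(1, len+1), so i ≥ 1 and 'i.toNat' is the exact exponent
def possible_kmers_list (sequence : String) : List Int :=
  (PySem.List.pyRange 1 (PySem.Str.len sequence + 1) 1).foldl
    (fun possible i =>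
      if PySem.Str.len sequence - i + 1 > 4 ^ i.toNat then possible ++ [4 ^ i.toNat]
      else possible ++ [PySem.Str.len sequence - i + 1]) []

-- ===== PORT B =====
-- B's while loop; the Nat argument is fuel (the loop runs at most n times: it requires i ≤ n)
def pvBLoop (n : Int) : Nat → Int → Int → List Int
  | 0, i, _ => PySem.List.pyRange (n - i + 1) 0 (-1)
  | fuel + 1, i, p =>
    if i ≤ n ∧ p < n - i + 1 then p :: pvBLoop n fuel (i + 1) (p * 4)
    else PySem.List.pyRange (n - i + 1) 0 (-1)

def possible_kmers_list_alt (sequence : String) : List Int :=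
  pvBLoop (PySem.Str.len sequence) ((PySem.Str.len sequence).toNat + 1) 1 4

-- ===== PRECONDITION & SPEC =====
def Spec_possible_kmers_list (sequence : String) (out : List Int) : Prop := out = possible_kmers_list_alt sequence
instance (sequence : String) (out : List Int) : Decidable (Spec_possible_kmers_list sequence out) := by unfold Spec_possible_kmers_list; infer_instance

-- ===== CLAIM (what is proved, stated in full; the proofs are below) =====
def Claim_equal_possible_kmers_list : Prop := ∀ (sequence : String), Dom_possible_kmers_list sequence → Spec_possible_kmers_list sequence (possible_kmers_list sequence)

-- ===== LEMMAS AND PROOFS =====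

-- the per-index value A appends
def pvF (n i : Int) : Int := if n - i + 1 > 4 ^ i.toNat then 4 ^ i.toNat else n - i + 1

lemma pvA_eq_map (s : String) :
    possible_kmers_list s =
      (PySem.List.pyRange 1 (PySem.Str.len s + 1) 1).map (pvF (PySem.Str.len s)) := by
  unfold possible_kmers_list
  rw [show (fun (possible : List Int) i =>
      if PySem.Str.len s - i + 1 > 4 ^ i.toNat then possible ++ [4 ^ i.toNat]
      else possible ++ [PySem.Str.len s - i + 1])
      = fun possible i => possible ++ [pvF (PySem.Str.len s) i] from by
        funext possible i; unfold pvF; split_ifs <;> rfl]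
  simpa using PySem.List.foldl_append_singleton_eq_map (pvF (PySem.Str.len s)) _ []

lemma pvPow_le_pow (i : Int) (hi : 0 ≤ i) : (4 : Int) ^ i.toNat ≤ 4 ^ (i + 1).toNat := by
  have h : (i + 1).toNat = i.toNat + 1 := by omega
  rw [h, pow_succ]
  nlinarith [pow_pos (by norm_num : (0:Int) < 4) i.toNat]

-- once 4^i has caught up with n-i+1, the remaining mins are the countdown n-i+1, …, 1
lemma pvTail (n i : Int) (hi : 1 ≤ i) (hp : n - i + 1 ≤ 4 ^ i.toNat) :
    (PySem.List.pyRange i (n + 1) 1).map (pvF n) = PySem.List.pyRange (n - i + 1) 0 (-1) := by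
  by_cases h : n < i
  · rw [PySem.List.pyRange_one_eq_nil (by omega), PySem.List.pyRange_neg_one_eq_nil (by omega)]
    simp
  · have hin : i ≤ n := by omega
    rw [PySem.List.pyRange_one_cons (by omega), PySem.List.pyRange_neg_one_cons (by omega)]
    simp only [List.map_cons]
    have hhead : pvF n i = n - i + 1 := by unfold pvF; rw [if_neg (by omega)]
    have htail := pvTail n (i + 1) (by omega)
      (le_trans (by omega) (pvPow_le_pow i (by omega)))
    rw [hhead, show n - i + 1 - 1 = n - (i + 1) + 1 by ring, htail]
termination_by (n + 1 - i).toNat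
decreasing_by omega

lemma pvLoop (n i : Int) (fuel : Nat) (hi : 1 ≤ i) (hfuel : (n + 1 - i).toNat ≤ fuel) :
    pvBLoop n fuel i (4 ^ i.toNat) = (PySem.List.pyRange i (n + 1) 1).map (pvF n) := by
  induction fuel generalizing i with
  | zero =>
    unfold pvBLoop
    rw [PySem.List.pyRange_one_eq_nil (by omega), PySem.List.pyRange_neg_one_eq_nil (by omega)]
    simp
  | succ fuel ih =>
    unfold pvBLoop
    split_ifs with h
    · obtain ⟨hin, hp⟩ := h
      rw [PySem.List.pyRange_one_cons (by omega), List.map_cons]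
      have hhead : pvF n i = 4 ^ i.toNat := by unfold pvF; rw [if_pos (by omega)]
      rw [hhead]
      congr 1
      have hpow : (4 : Int) ^ i.toNat * 4 = 4 ^ (i + 1).toNat := by
          rw [show (i + 1).toNat = i.toNat + 1 by omega, pow_succ]
      rw [hpow]
      exact ih (i + 1) (by omega) (by omega)
    · by_cases hin : i ≤ n
      · have hp : n - i + 1 ≤ 4 ^ i.toNat := by
          rcases not_and_or.mp h with h1 | h1
          · omega
          · omega
        exact (pvTail n i hi hp).symm
      · rw [PySem.List.pyRange_one_eq_nil (by omega), PySem.List.pyRange_neg_one_eq_nil (by omega)]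
        simp

-- ===== VERDICT (by name: the statement is the Claim_ definition above) =====
theorem possible_kmers_list_spec : Claim_equal_possible_kmers_list := by
  intro s _
  unfold Spec_possible_kmers_list possible_kmers_list_alt
  rw [pvA_eq_map]
  have hlen : (0 : Int) ≤ PySem.Str.len s := by
    rw [PySem.Str.len_eq]; positivity
  rw [show (4 : Int) = 4 ^ (1 : Int).toNat by norm_num]
  exact (pvLoop (PySem.Str.len s) 1 ((PySem.Str.len s).toNat + 1) le_rfl (by omega)).symm
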